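-- pv_equiv track=rewrite | github.com/Twozee-Tech/OCR-Pipeline | src/stage2_ocr.py | fix_table_formatting
-- ===== SOURCE A (Python) =====
-- def fix_table_formatting(text: str) -> str:
--     """Improve table formatting in markdown."""
--     lines = text.split('\n')
--     result = []
--     in_table = False
--
--     for line in lines:
--         if '|' in line and line.count('|') >= 2:
--             if not in_table:
--                 in_table = True
--                 result.append('')  # Blank line before table
--             result.append(line)
--         else:
--             if in_table:
--                 in_table = False
--                 result.append('')  # Blank line after table
--             result.append(line)
--
--     return '\n'.join(result)
-- ===== SOURCE B (Python) =====
-- def fix_table_formatting(text: str) -> str: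
--     """Improve table formatting in markdown (run-based rewrite)."""
--     lines = text.split('\n')
--     is_t = [('|' in l and l.count('|') >= 2) for l in lines]
--     out = []
--     i, n = 0, len(lines)
--     prev = False
--     while i < n:
--         j = i + 1
--         while j < n and is_t[j] == is_t[i]:
--             j += 1
--         if is_t[i] or prev:
--             out.append('')
--         out.extend(lines[i:j])
--         prev = is_t[i]
--         i = j
--     return '\n'.join(out)
-- ===== Notes on version B (the rewrite author's own statement) =====
-- stated objective: alternative
-- what changed: B splits the text into maximal runs of same-type (table/non-table) lines and decides blank insertion once per run boundary (blank iff the run is a table run or follows one), instead of A's per-line state machine toggling an in_table flag.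
import Mathlib
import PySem

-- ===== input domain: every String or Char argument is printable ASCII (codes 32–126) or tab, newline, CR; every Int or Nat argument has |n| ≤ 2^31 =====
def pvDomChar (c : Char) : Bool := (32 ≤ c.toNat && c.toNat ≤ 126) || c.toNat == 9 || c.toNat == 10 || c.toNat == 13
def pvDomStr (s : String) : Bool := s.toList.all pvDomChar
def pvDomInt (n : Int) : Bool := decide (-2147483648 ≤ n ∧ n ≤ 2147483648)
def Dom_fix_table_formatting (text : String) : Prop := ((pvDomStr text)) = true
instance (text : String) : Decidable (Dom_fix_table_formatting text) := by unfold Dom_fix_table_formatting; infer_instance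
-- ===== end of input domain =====

-- B groups the lines into maximal runs of same-type lines and inserts blanks at run
-- boundaries, instead of A's per-line in_table state machine. Same result, same cost.

-- ===== PORT A =====
-- '|' in line and line.count('|') >= 2  (the table test, textually identical in both Pythons)
def pvIsTable (line : List Char) : Bool :=
  PySem.Chars.isIn ['|'] line && decide (2 ≤ PySem.Chars.count line ['|'])

def fix_table_formatting (text : String) : String :=
  let lines := PySem.Chars.splitOn text.toList ['\n']
  let st := lines.foldl (fun (st : List (List Char) × Bool) line =>
    if pvIsTable line then
      if !st.2 then (st.1 ++ [[]] ++ [line], true) else (st.1 ++ [line], true)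
    else
      if st.2 then (st.1 ++ [[]] ++ [line], false) else (st.1 ++ [line], false))
    ([], false)
  String.ofList (PySem.Chars.join ['\n'] st.1)

-- ===== PORT B =====
-- the maximal runs of lines with equal pvIsTable-key, as (run head, run tail)
def pvRuns : List (List Char) → List (List Char × List (List Char))
  | [] => []
  | l :: ls =>
    (l, ls.takeWhile (fun x => pvIsTable x == pvIsTable l)) ::
      pvRuns (ls.dropWhile (fun x => pvIsTable x == pvIsTable l))
termination_by ls => ls.length
decreasing_by
  simpa using Nat.lt_succ_of_le (List.length_dropWhile_le _ _)

-- emit the runs: blank line before a table run or after one, then the run itself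
def pvEmit : List (List Char × List (List Char)) → Bool → List (List Char)
  | [], _ => []
  | (h, t) :: rs, prev =>
    (if pvIsTable h || prev then [[]] else []) ++ (h :: t) ++ pvEmit rs (pvIsTable h)

def fix_table_formatting_alt (text : String) : String :=
  String.ofList (PySem.Chars.join ['\n']
    (pvEmit (pvRuns (PySem.Chars.splitOn text.toList ['\n'])) false))

-- ===== PRECONDITION & SPEC =====
def Spec_fix_table_formatting (text : String) (out : String) : Prop := out = fix_table_formatting_alt text
instance (text : String) (out : String) : Decidable (Spec_fix_table_formatting text out) := by unfold Spec_fix_table_formatting; infer_instance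

-- ===== CLAIM (what is proved, stated in full; the proofs are below) =====
def Claim_equal_fix_table_formatting : Prop := ∀ (text : String), Dom_fix_table_formatting text → Spec_fix_table_formatting text (fix_table_formatting text)

-- ===== LEMMAS AND PROOFS =====

-- A's loop, written as structural recursion (blank iff the key flips, flag becomes the key)
def pvLoopA : List (List Char) → Bool → List (List Char)
  | [], _ => []
  | l :: ls, t =>
    (if pvIsTable l ≠ t then [[]] else []) ++ [l] ++ pvLoopA ls (pvIsTable l)

theorem pvLoopA_cons (l : List Char) (ls : List (List Char)) (t : Bool) :
    pvLoopA (l :: ls) t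
      = (if pvIsTable l ≠ t then [[]] else []) ++ [l] ++ pvLoopA ls (pvIsTable l) := rfl

-- A's foldl unrolls to pvLoopA
theorem pvFoldA_eq (lines : List (List Char)) : ∀ (acc : List (List Char)) (t : Bool),
    (lines.foldl (fun (st : List (List Char) × Bool) line =>
      if pvIsTable line then
        if !st.2 then (st.1 ++ [[]] ++ [line], true) else (st.1 ++ [line], true)
      else
        if st.2 then (st.1 ++ [[]] ++ [line], false) else (st.1 ++ [line], false))
      (acc, t)).1 = acc ++ pvLoopA lines t := by
  induction lines with
  | nil => intro acc t; simp [pvLoopA]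
  | cons l ls ih =>
    intro acc t
    rw [List.foldl_cons]
    cases hk : pvIsTable l <;> cases t <;>
      · simp only [Bool.not_true, Bool.not_false, if_true, if_false, Bool.false_eq_true]
        rw [ih]
        simp [pvLoopA_cons, hk]

-- consuming a uniform-key run adds no blanks
theorem pvLoopA_run : ∀ (tail rest : List (List Char)) (k : Bool),
    (∀ x ∈ tail, pvIsTable x = k) →
    pvLoopA (tail ++ rest) k = tail ++ pvLoopA rest k := by
  intro tail
  induction tail with
  | nil => intro rest k _; simp
  | cons x xs ih =>
    intro rest k h
    have hx : pvIsTable x = k := h x (by simp)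
    simp [pvLoopA_cons, hx, ih rest k (fun y hy => h y (by simp [hy]))]

-- main: emitting the runs reproduces A's loop, provided the flag can only be true
-- when the first line is a non-table line (which holds at every run boundary)
theorem pvEmit_eq : ∀ (n : Nat) (lines : List (List Char)), lines.length ≤ n → ∀ (t : Bool),
    (t = true → ∀ h₀ rest, lines = h₀ :: rest → pvIsTable h₀ = false) →
    pvEmit (pvRuns lines) t = pvLoopA lines t := by
  intro n
  induction n with
  | zero =>
    intro lines hlen t _
    cases lines with
    | nil => simp [pvRuns, pvEmit, pvLoopA]
    | cons l ls => simp at hlen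
  | succ m ih =>
    intro lines hlen t hflag
    cases lines with
    | nil => simp [pvRuns, pvEmit, pvLoopA]
    | cons l ls =>
      have hk : (pvIsTable l ≠ t) ↔ ((pvIsTable l || t) = true) := by
        cases hkl : pvIsTable l <;> cases htt : t
        · simp
        · simp
        · simp
        · exact absurd (hflag htt l ls rfl) (by simp [hkl])
      set p := fun x => pvIsTable x == pvIsTable l with hp
      have htw : ∀ x ∈ ls.takeWhile p, pvIsTable x = pvIsTable l := by
        intro x hx
        have := List.mem_takeWhile_imp hx
        simpa [hp] using this
      have hdrop : (ls.dropWhile p).length ≤ m := by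
        have h1 := List.length_dropWhile_le (p := p) (l := ls)
        have h2 := hlen
        simp [List.length_cons] at h2
        omega
      have hrec : pvEmit (pvRuns (ls.dropWhile p)) (pvIsTable l)
          = pvLoopA (ls.dropWhile p) (pvIsTable l) := by
        apply ih _ hdrop
        intro ht h₀ rest heq
        have hhead : p h₀ = false := by
          have h2 := List.head?_dropWhile_not p ls
          rw [heq] at h2
          simpa using h2
        cases hkl : pvIsTable h₀
        · rfl
        · simp [hp, hkl, ht] at hhead
      have hsplit : ls.takeWhile p ++ ls.dropWhile p = ls := List.takeWhile_append_dropWhile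
      calc pvEmit (pvRuns (l :: ls)) t
          = (if pvIsTable l || t then [[]] else []) ++ (l :: ls.takeWhile p)
              ++ pvEmit (pvRuns (ls.dropWhile p)) (pvIsTable l) := by
            rw [pvRuns]
            simp [pvEmit, hp]
        _ = (if pvIsTable l ≠ t then [[]] else []) ++ [l]
              ++ (ls.takeWhile p ++ pvLoopA (ls.dropWhile p) (pvIsTable l)) := by
            rw [hrec]
            by_cases hc : pvIsTable l ≠ t
            · rw [if_pos hc, if_pos (hk.mp hc)]; simp
            · rw [if_neg hc, if_neg (fun hb => hc (hk.mpr hb))]; simp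
        _ = (if pvIsTable l ≠ t then [[]] else []) ++ [l]
              ++ pvLoopA ls (pvIsTable l) := by
            rw [← pvLoopA_run (ls.takeWhile p) (ls.dropWhile p) (pvIsTable l) htw, hsplit]
        _ = pvLoopA (l :: ls) t := (pvLoopA_cons l ls t).symm

-- ===== VERDICT (by name: the statement is the Claim_ definition above) =====
theorem fix_table_formatting_spec : Claim_equal_fix_table_formatting := by
  intro text _
  show fix_table_formatting text = fix_table_formatting_alt text
  unfold fix_table_formatting fix_table_formatting_alt
  dsimp only
  rw [pvFoldA_eq, pvEmit_eq (PySem.Chars.splitOn text.toList ['\n']).length _ le_rfl false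
    (by simp)]
  simp
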